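-- pv_equiv track=rewrite | github.com/RakshithJoseph/Plivo_ML_assignment | rules.py | collapse_spelled_letters
-- ===== SOURCE A (Python) =====
-- def collapse_spelled_letters(s: str) -> str:
--     tokens = s.split()
--     out = []
--     i = 0
--     while i < len(tokens):
--         if len(tokens[i]) == 1 and tokens[i].isalpha():
--             j = i
--             letters = []
--             while j < len(tokens) and len(tokens[j]) == 1 and tokens[j].isalpha():
--                 letters.append(tokens[j])
--                 j += 1
--             if len(letters) >= 2:
--                 out.append(''.join(letters))
--                 i = j
--                 continue
--         out.append(tokens[i])
--         i += 1
--     return ' '.join(out)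
-- ===== SOURCE B (Python) =====
-- def collapse_spelled_letters(s: str) -> str:
--     out = []
--     run = []
--     for tok in s.split():
--         if len(tok) == 1 and tok.isalpha():
--             run.append(tok)
--         else:
--             out.extend(run if len(run) < 2 else [''.join(run)])
--             run = []
--             out.append(tok)
--     out.extend(run if len(run) < 2 else [''.join(run)])
--     return ' '.join(out)
-- ===== Notes on version B (the rewrite author's own statement) =====
-- stated objective: simpler
-- what changed: Replaces A's nested two-pointer index scan (inner while re-collecting each letter run) with a single left fold over the tokens carrying a pending run of single-letter tokens that is flushed when a non-letter token or the end is reached.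
import Mathlib
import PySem

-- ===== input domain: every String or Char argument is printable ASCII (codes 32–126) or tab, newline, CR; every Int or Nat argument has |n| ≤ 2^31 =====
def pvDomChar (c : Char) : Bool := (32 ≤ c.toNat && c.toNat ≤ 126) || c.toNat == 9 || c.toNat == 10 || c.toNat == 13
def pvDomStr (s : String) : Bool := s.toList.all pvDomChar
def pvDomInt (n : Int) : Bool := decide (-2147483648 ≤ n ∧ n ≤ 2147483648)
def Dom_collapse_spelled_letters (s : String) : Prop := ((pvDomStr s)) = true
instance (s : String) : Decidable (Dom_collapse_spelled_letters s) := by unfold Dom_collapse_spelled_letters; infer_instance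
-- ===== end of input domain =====

-- B replaces A's nested two-pointer index scan with a single left fold carrying a pending
-- run of single-letter tokens (objective: simpler, one pass over one state).

-- ===== PORT A =====
-- A's index i / j over tokens is represented by the remaining suffix of the token list.
-- inner while loop: collect letters while the head is a single alphabetic token.
def pvInnerA (rem : List String) (letters : List String) : List String × List String :=
  match rem with
  | [] => (letters, [])
  | t :: rest =>
    if PySem.Str.len t == 1 && PySem.Str.strIsalpha t then
      pvInnerA rest (letters ++ [t])
    else (letters, t :: rest)

theorem pvInnerA_rem_le (rem letters : List String) :
    (pvInnerA rem letters).2.length ≤ rem.length := by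
  induction rem generalizing letters with
  | nil => simp [pvInnerA]
  | cons t rest ih =>
    simp only [pvInnerA]
    split
    · exact Nat.le_trans (ih _) (Nat.le_succ _)
    · simp

def pvOuterA (rem : List String) (out : List String) : List String :=
  match rem with
  | [] => out
  | t :: rest =>
    if PySem.Str.len t == 1 && PySem.Str.strIsalpha t then
      match h : pvInnerA (t :: rest) [] with
      | (letters, rem') =>
        if 2 ≤ letters.length then
          pvOuterA rem' (out ++ [PySem.Str.join "" letters])
        else
          pvOuterA rest (out ++ [t])
    else
      pvOuterA rest (out ++ [t])
termination_by rem.length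
decreasing_by
  · have h2 : (pvInnerA (t :: rest) []).2.length ≤ rest.length := by
      simp only [pvInnerA, *]
      exact pvInnerA_rem_le rest [t]
    rw [h] at h2
    simpa using Nat.lt_succ_of_le h2
  · simp
  · simp

def collapse_spelled_letters (s : String) : String :=
  PySem.Str.join " " (pvOuterA (PySem.Str.split₀ s) [])

-- ===== PORT B =====
def pvFlushB (out run : List String) : List String :=
  if run.length < 2 then out ++ run else out ++ [PySem.Str.join "" run]

def pvStepB (acc : List String × List String) (tok : String) : List String × List String :=
  if PySem.Str.len tok == 1 && PySem.Str.strIsalpha tok then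
    (acc.1, acc.2 ++ [tok])
  else
    (pvFlushB acc.1 acc.2 ++ [tok], [])

def collapse_spelled_letters_alt (s : String) : String :=
  let acc := (PySem.Str.split₀ s).foldl pvStepB ([], [])
  PySem.Str.join " " (pvFlushB acc.1 acc.2)

-- ===== PRECONDITION & SPEC =====
def Spec_collapse_spelled_letters (s : String) (out : String) : Prop := out = collapse_spelled_letters_alt s
instance (s : String) (out : String) : Decidable (Spec_collapse_spelled_letters s out) := by unfold Spec_collapse_spelled_letters; infer_instance

-- ===== CLAIM (what is proved, stated in full; the proofs are below) =====
def Claim_equal_collapse_spelled_letters : Prop := ∀ (s : String), Dom_collapse_spelled_letters s → Spec_collapse_spelled_letters s (collapse_spelled_letters s)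

-- ===== LEMMAS AND PROOFS =====
def pvP (t : String) : Bool := PySem.Str.len t == 1 && PySem.Str.strIsalpha t

theorem pvInnerA_allP (xs rest ls : List String) (h : ∀ t ∈ xs, pvP t = true) :
    pvInnerA (xs ++ rest) ls = pvInnerA rest (ls ++ xs) := by
  induction xs generalizing ls with
  | nil => simp
  | cons x xs ih =>
    have hx : pvP x = true := h x (by simp)
    simp only [List.cons_append, pvInnerA]
    rw [if_pos (by simpa [pvP] using hx)]
    rw [ih _ (fun t ht => h t (by simp [ht]))]
    simp

theorem pvInnerA_stop (rem ls : List String) (h : ∀ t, rem.head? = some t → pvP t = false) :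
    pvInnerA rem ls = (ls, rem) := by
  cases rem with
  | nil => simp [pvInnerA]
  | cons t rest =>
    have := h t rfl
    simp only [pvInnerA]
    rw [if_neg (by simpa [pvP] using this)]

theorem pvOuterA_nil (out : List String) : pvOuterA [] out = out := by
  rw [pvOuterA]

theorem pvOuterA_notP (t : String) (ts out : List String) (h : pvP t = false) :
    pvOuterA (t :: ts) out = pvOuterA ts (out ++ [t]) := by
  rw [pvOuterA.eq_def]
  simp only
  rw [if_neg (by simpa [pvP] using h)]

theorem pvOuterA_run (run rest out : List String) (hne : run ≠ [])
    (hrun : ∀ t ∈ run, pvP t = true)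
    (hstop : ∀ t, rest.head? = some t → pvP t = false) :
    pvOuterA (run ++ rest) out = pvOuterA rest (pvFlushB out run) := by
  match run, hne with
  | r1 :: run', _ =>
    have h1 : pvP r1 = true := hrun r1 (by simp)
    rw [List.cons_append, pvOuterA.eq_def]
    simp only
    rw [if_pos (by simpa [pvP] using h1)]
    have hin : pvInnerA (r1 :: (run' ++ rest)) [] = (r1 :: run', rest) := by
      have ha := pvInnerA_allP (r1 :: run') rest [] hrun
      have hb := pvInnerA_stop rest (r1 :: run') hstop
      simpa [hb] using ha
    rw [show (r1 :: (run' ++ rest)) = ((r1 :: run') ++ rest) from rfl] at hin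
    simp only [List.cons_append] at hin
    rw [hin]
    match run' with
    | [] =>
      rw [if_neg (by simp)]
      simp [pvFlushB]
    | r2 :: rs =>
      rw [if_pos (by simp)]
      simp [pvFlushB]

theorem pvMain (ts out run : List String) (hrun : ∀ t ∈ run, pvP t = true) :
    pvFlushB (List.foldl pvStepB (out, run) ts).1 (List.foldl pvStepB (out, run) ts).2
      = pvOuterA (run ++ ts) out := by
  induction ts generalizing out run with
  | nil =>
    simp only [List.foldl_nil, List.append_nil]
    match run with
    | [] => simp [pvFlushB, pvOuterA_nil]
    | r :: rs =>
      have := pvOuterA_run (r :: rs) [] out (by simp) hrun (by simp)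
      simp only [List.append_nil] at this
      rw [this, pvOuterA_nil]
  | cons t ts ih =>
    by_cases hP : pvP t = true
    · simp only [List.foldl_cons, pvStepB]
      rw [if_pos (by simpa [pvP] using hP)]
      have := ih out (run ++ [t]) (by
        intro x hx
        rcases List.mem_append.mp hx with h | h
        · exact hrun x h
        · simp at h; subst h; exact hP)
      simpa using this
    · have hPf : pvP t = false := by simpa using hP
      simp only [List.foldl_cons, pvStepB]
      rw [if_neg (by simpa [pvP] using hPf)]
      have hih := ih (pvFlushB out run ++ [t]) [] (by simp)
      simp only [List.nil_append] at hih
      rw [hih]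
      match run with
      | [] =>
        rw [List.nil_append, pvOuterA_notP t ts out hPf]
        simp [pvFlushB]
      | r :: rs =>
        rw [pvOuterA_run (r :: rs) (t :: ts) out (by simp) hrun
            (by intro x hx; simp at hx; subst hx; exact hPf)]
        rw [pvOuterA_notP t ts _ hPf]

-- ===== VERDICT (by name: the statement is the Claim_ definition above) =====
theorem collapse_spelled_letters_spec : Claim_equal_collapse_spelled_letters := by
  intro s _
  unfold Spec_collapse_spelled_letters
  simp only [collapse_spelled_letters, collapse_spelled_letters_alt]
  have := pvMain (PySem.Str.split₀ s) [] [] (by simp)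
  simp only [List.nil_append] at this
  rw [this]
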